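-- pv_equiv track=rewrite | github.com/erolkuluslu/MNEME | src/layer7_generation/citations.py | _extract_sentence
-- ===== SOURCE A (Python) =====
-- def _extract_sentence(text: str, position: int) -> str:
--     """
--     Extract the sentence containing the citation.
--
--     Args:
--         text: Full text
--         position: Position of citation
--
--     Returns:
--         Sentence containing the citation
--     """
--     # Find sentence boundaries
--     # Look for period, question mark, or exclamation before position
--     start = 0
--     for i in range(position - 1, -1, -1):
--         if text[i] in '.?!':
--             start = i + 1
--             break
--
--     # Look for period, question mark, or exclamation after position
--     end = len(text)
--     for i in range(position, len(text)):
--         if text[i] in '.?!':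
--             end = i + 1
--             break
--
--     sentence = text[start:end].strip()
--
--     # Clean up any leading whitespace or newlines
--     sentence = ' '.join(sentence.split())
--
--     return sentence
-- ===== SOURCE B (Python) =====
-- def _extract_sentence(text: str, position: int) -> str:
--     """Extract the sentence containing the given position (index list + scan, no per-char boundary loops)."""
--     delims = [i for i, ch in enumerate(text) if ch in '.?!']
--     start = 0
--     for d in delims:
--         if d < position:
--             start = d + 1
--         else:
--             break
--     end = next((d + 1 for d in delims if d >= position), len(text))
--     return ' '.join(text[start:end].split())
-- ===== Notes on version B (the rewrite author's own statement) =====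
-- stated objective: alternative
-- what changed: B collects all delimiter indices in a single enumerate pass and finds the sentence boundaries by scanning that index list (last delimiter before / first at-or-after the position), instead of A's two early-breaking per-character loops outward from the position; the redundant strip() before split() is dropped.
-- outside the precondition, e.g. on _extract_sentence('a.b.c', -2): A returns 'a.b.', B returns 'a.'; on _extract_sentence('ab', 5): A raises IndexError, B returns 'ab'
import Mathlib
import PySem

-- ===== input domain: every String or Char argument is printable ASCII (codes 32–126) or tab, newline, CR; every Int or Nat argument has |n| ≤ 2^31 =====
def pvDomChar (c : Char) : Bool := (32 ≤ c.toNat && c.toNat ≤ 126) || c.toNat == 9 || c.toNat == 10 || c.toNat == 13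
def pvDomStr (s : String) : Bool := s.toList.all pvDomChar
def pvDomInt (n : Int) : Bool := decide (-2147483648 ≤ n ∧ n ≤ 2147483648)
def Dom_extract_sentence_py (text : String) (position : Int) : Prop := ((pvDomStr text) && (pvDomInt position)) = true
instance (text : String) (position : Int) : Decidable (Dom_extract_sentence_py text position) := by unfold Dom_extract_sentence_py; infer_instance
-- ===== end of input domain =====

-- B replaces A's two early-breaking per-character boundary scans by one pass collecting the
-- delimiter indices and two short scans over that index list (objective: alternative decomposition).

-- shared by both ports: Python's `ch in '.?!'` membership test on a single character
def pvDelim (c : Char) : Bool := PySem.Chars.isIn [c] ['.', '?', '!']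

-- ===== PORT A =====
-- `for i in range(position-1, -1, -1): if text[i] in '.?!': start = i+1; break` (start = 0 initially)
def pvAStart (l : List Char) : List Int → Int
  | [] => 0
  | i :: rest => if pvDelim (PySem.List.pyGetD l i ' ') then i + 1 else pvAStart l rest

-- `for i in range(position, len(text)): if text[i] in '.?!': end = i+1; break` (end = len(text) initially)
def pvAEnd (l : List Char) (n : Int) : List Int → Int
  | [] => n
  | i :: rest => if pvDelim (PySem.List.pyGetD l i ' ') then i + 1 else pvAEnd l n rest

def extract_sentence_py (text : String) (position : Int) : String :=
  let l := text.toList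
  let start := pvAStart l (PySem.List.pyRange (position - 1) (-1) (-1))
  let e := pvAEnd l (l.length : Int) (PySem.List.pyRange position (l.length : Int) 1)
  let sentence := PySem.Chars.strip (PySem.Chars.slice l (some start) (some e))
  String.ofList (PySem.Chars.join [' '] (PySem.Chars.split₀ sentence))

-- ===== PORT B =====
-- `delims = [i for i, ch in enumerate(text) if ch in '.?!']`
def pvDelims (l : List Char) : List Int :=
  ((PySem.List.enumerate l 0).filter (fun p => pvDelim p.2)).map (·.1)

-- `for d in delims: if d < position: start = d + 1 else: break`
def pvBStart (position : Int) : List Int → Int → Int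
  | [], acc => acc
  | d :: rest, acc => if d < position then pvBStart position rest (d + 1) else acc

-- `next((d + 1 for d in delims if d >= position), len(text))`
def pvBEnd (position n : Int) : List Int → Int
  | [] => n
  | d :: rest => if position ≤ d then d + 1 else pvBEnd position n rest

def extract_sentence_py_alt (text : String) (position : Int) : String :=
  let l := text.toList
  let delims := pvDelims l
  let start := pvBStart position delims 0
  let e := pvBEnd position (l.length : Int) delims
  String.ofList (PySem.Chars.join [' '] (PySem.Chars.split₀ (PySem.Chars.slice l (some start) (some e))))

-- ===== PRECONDITION & SPEC =====
-- Pre_ excludes position > len(text), where A raises IndexError, and negative positions (on which A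
-- still returns a value) because there A's forward scan reads text through Python negative-index
-- wraparound, an accident of A's implementation outside the function's natural domain (a citation
-- position is an index into text).
def Pre_extract_sentence_py (text : String) (position : Int) : Prop :=
  0 ≤ position ∧ position ≤ (text.toList.length : Int)
instance (text : String) (position : Int) : Decidable (Pre_extract_sentence_py text position) := by
  unfold Pre_extract_sentence_py; infer_instance

def pvWitness_extract_sentence_py : String × Int := ("One. Two two? Three!", 7)

def Spec_extract_sentence_py (text : String) (position : Int) (out : String) : Prop := out = extract_sentence_py_alt text position
instance (text : String) (position : Int) (out : String) : Decidable (Spec_extract_sentence_py text position out) := by unfold Spec_extract_sentence_py; infer_instance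

-- ===== CLAIM (what is proved, stated in full; the proofs are below) =====
def Claim_equal_extract_sentence_py : Prop := ∀ (text : String) (position : Int), Dom_extract_sentence_py text position → Pre_extract_sentence_py text position → Spec_extract_sentence_py text position (extract_sentence_py text position)

-- ===== LEMMAS AND PROOFS =====

-- membership in the delimiter-index list
theorem mem_pvDelims {l : List Char} {d : Int} :
    d ∈ pvDelims l ↔ ∃ (k : Nat) (hk : k < l.length), d = (k : Int) ∧ pvDelim l[k] = true := by
  unfold pvDelims
  simp [List.mem_filter, PySem.List.mem_enumerate_iff]

theorem pairwise_pvDelims (l : List Char) : (pvDelims l).Pairwise (· < ·) := by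
  unfold pvDelims
  rw [List.pairwise_map]
  exact (PySem.List.pairwise_lt_enumerate l 0).filter _

theorem mem_pvDelims_iff_delim {l : List Char} {p : Int} (h0 : 0 ≤ p) (hn : p < (l.length : Int)) :
    p ∈ pvDelims l ↔ pvDelim (PySem.List.pyGetD l p ' ') = true := by
  rw [PySem.List.pyGetD_eq_getElem l ' ' h0 hn, mem_pvDelims]
  constructor
  · rintro ⟨k, hk, rfl, hd⟩; simpa using hd
  · intro hd; exact ⟨p.toNat, by omega, by omega, hd⟩

-- pvBStart helper lemmas
theorem pvBStart_of_forall_ge {p : Int} {D : List Int} (h : ∀ d ∈ D, p ≤ d) (acc : Int) :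
    pvBStart p D acc = acc := by
  cases D with
  | nil => rfl
  | cons d rest =>
    have := h d (by simp)
    simp [pvBStart, not_lt.mpr this]

theorem pvBStart_of_mem_pred {p : Int} {D : List Int}
    (hs : D.Pairwise (· < ·)) (hm : (p - 1) ∈ D) (acc : Int) :
    pvBStart p D acc = p := by
  induction D generalizing acc with
  | nil => simp at hm
  | cons d rest ih =>
    rcases List.pairwise_cons.mp hs with ⟨hd, hrest⟩
    rcases List.mem_cons.mp hm with h1 | h1
    · subst h1
      simp only [pvBStart, if_pos (by omega : p - 1 < p)]
      rw [pvBStart_of_forall_ge (fun x hx => by have := hd x hx; omega)]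
      omega
    · have hdp : d < p - 1 := hd _ h1
      simp only [pvBStart, if_pos (by omega : d < p)]
      exact ih hrest h1 _

theorem pvBStart_not_mem {p : Int} {D : List Int} (hm : (p - 1) ∉ D) (acc : Int) :
    pvBStart p D acc = pvBStart (p - 1) D acc := by
  induction D generalizing acc with
  | nil => rfl
  | cons d rest ih =>
    have hne : d ≠ p - 1 := fun h => hm (by simp [h])
    by_cases h : d < p - 1
    · simp only [pvBStart, if_pos h, if_pos (by omega : d < p)]
      exact ih (fun h' => hm (List.mem_cons_of_mem _ h')) _
    · simp only [pvBStart, if_neg (by omega : ¬ d < p), if_neg h]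

-- pvBEnd helper lemmas
theorem pvBEnd_of_forall_lt {p n : Int} {D : List Int} (h : ∀ d ∈ D, d < p) :
    pvBEnd p n D = n := by
  induction D with
  | nil => rfl
  | cons d rest ih =>
    simp only [pvBEnd, if_neg (not_le.mpr (h d (by simp)))]
    exact ih (fun x hx => h x (List.mem_cons_of_mem _ hx))

theorem pvBEnd_of_mem {p n : Int} {D : List Int}
    (hs : D.Pairwise (· < ·)) (hm : p ∈ D) :
    pvBEnd p n D = p + 1 := by
  induction D with
  | nil => simp at hm
  | cons d rest ih =>
    rcases List.pairwise_cons.mp hs with ⟨hd, hrest⟩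
    rcases List.mem_cons.mp hm with h1 | h1
    · subst h1; simp [pvBEnd]
    · have : p ≤ d → False := fun h => by have := hd _ h1; omega
      simp only [pvBEnd, if_neg this]
      exact ih hrest h1

theorem pvBEnd_not_mem {p n : Int} {D : List Int} (hm : p ∉ D) :
    pvBEnd p n D = pvBEnd (p + 1) n D := by
  induction D with
  | nil => rfl
  | cons d rest ih =>
    have hne : d ≠ p := fun h => hm (by simp [h])
    by_cases h : p ≤ d
    · simp only [pvBEnd, if_pos h, if_pos (by omega : p + 1 ≤ d)]
    · simp only [pvBEnd, if_neg h, if_neg (by omega : ¬ p + 1 ≤ d)]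
      exact ih (fun h' => hm (List.mem_cons_of_mem _ h'))

-- the two boundary computations agree
theorem start_eq (l : List Char) (p : Int) (h0 : 0 ≤ p) (hn : p ≤ (l.length : Int)) :
    pvAStart l (PySem.List.pyRange (p - 1) (-1) (-1)) = pvBStart p (pvDelims l) 0 := by
  obtain ⟨m, rfl⟩ : ∃ m : Nat, p = (m : Int) := ⟨p.toNat, by omega⟩
  induction m with
  | zero =>
    rw [PySem.List.pyRange_neg_one_eq_nil (by omega)]
    rw [pvBStart_of_forall_ge (fun d hd => by
      obtain ⟨k, hk, rfl, _⟩ := mem_pvDelims.mp hd; omega)]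
    rfl
  | succ m ih =>
    rw [PySem.List.pyRange_neg_one_cons (by omega : (-1 : Int) < (m + 1 : Nat) - 1)]
    have hmn : (m : Int) < l.length := by push_cast at hn ⊢; omega
    have hstep : ((m + 1 : Nat) : Int) - 1 = (m : Int) := by push_cast; ring
    rw [hstep]
    by_cases hd : pvDelim (PySem.List.pyGetD l (m : Int) ' ') = true
    · rw [pvAStart, if_pos hd]
      rw [pvBStart_of_mem_pred (pairwise_pvDelims l)
        (by rw [show ((m+1 : Nat) : Int) - 1 = (m : Int) by push_cast; ring];
            exact (mem_pvDelims_iff_delim (by omega) hmn).mpr hd)]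
      push_cast; ring
    · rw [pvAStart, if_neg hd]
      rw [pvBStart_not_mem (by
        rw [show ((m+1 : Nat) : Int) - 1 = (m : Int) by push_cast; ring]
        exact fun hm => hd ((mem_pvDelims_iff_delim (by omega) hmn).mp hm))]
      rw [show ((m+1 : Nat) : Int) - 1 = (m : Int) by push_cast; ring]
      exact ih (by omega) (by omega)

theorem end_eq (l : List Char) (p : Int) (h0 : 0 ≤ p) (hn : p ≤ (l.length : Int)) :
    pvAEnd l (l.length : Int) (PySem.List.pyRange p (l.length : Int) 1) = pvBEnd p (l.length : Int) (pvDelims l) := by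
  obtain ⟨m, hm⟩ : ∃ m : Nat, ((l.length : Int) - p).toNat = m := ⟨_, rfl⟩
  induction m generalizing p with
  | zero =>
    have : p = (l.length : Int) := by omega
    subst this
    rw [PySem.List.pyRange_one_eq_nil (by omega)]
    rw [pvBEnd_of_forall_lt (fun d hd => by
      obtain ⟨k, hk, rfl, _⟩ := mem_pvDelims.mp hd; omega)]
    rfl
  | succ m ih =>
    have hlt : p < (l.length : Int) := by omega
    rw [PySem.List.pyRange_one_cons hlt]
    by_cases hd : pvDelim (PySem.List.pyGetD l p ' ') = true
    · rw [pvAEnd, if_pos hd]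
      rw [pvBEnd_of_mem (pairwise_pvDelims l) ((mem_pvDelims_iff_delim h0 hlt).mpr hd)]
    · rw [pvAEnd, if_neg hd]
      rw [pvBEnd_not_mem (fun hm => hd ((mem_pvDelims_iff_delim h0 hlt).mp hm))]
      exact ih (p + 1) (by omega) (by omega) (by omega)

-- `' '.join(s.strip().split()) = ' '.join(s.split())`: split() ignores leading/trailing whitespace
theorem split₀_go_append_space {c : Char} (hc : PySem.Chars.isspace c = true) :
    ∀ (s cur : List Char) (acc : List (List Char)),
      PySem.Chars.split₀.go (s ++ [c]) cur acc = PySem.Chars.split₀.go s cur acc := by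
  intro s
  induction s with
  | nil =>
    intro cur acc
    by_cases h : cur.isEmpty
    · simp [PySem.Chars.split₀.go, hc, h]
    · simp [PySem.Chars.split₀.go, hc, h]
  | cons a t ih =>
    intro cur acc
    by_cases h : PySem.Chars.isspace a
    · by_cases h2 : cur.isEmpty <;> simp [PySem.Chars.split₀.go, h, h2, ih]
    · simp [PySem.Chars.split₀.go, h, ih]

theorem split₀_go_append_spaces {t : List Char} (ht : ∀ c ∈ t, PySem.Chars.isspace c = true) :
    ∀ (s cur : List Char) (acc : List (List Char)),
      PySem.Chars.split₀.go (s ++ t) cur acc = PySem.Chars.split₀.go s cur acc := by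
  induction t using List.reverseRecOn with
  | nil => simp
  | append_singleton t c ih =>
    intro s cur acc
    rw [show s ++ (t ++ [c]) = (s ++ t) ++ [c] by simp,
        split₀_go_append_space (ht c (by simp)),
        ih (fun x hx => ht x (by simp [hx]))]

theorem split₀_lstrip (s : List Char) (acc : List (List Char)) :
    PySem.Chars.split₀.go (PySem.Chars.lstrip s) [] acc = PySem.Chars.split₀.go s [] acc := by
  induction s with
  | nil => rfl
  | cons a t ih =>
    by_cases h : PySem.Chars.isspace a
    · rw [show PySem.Chars.lstrip (a :: t) = PySem.Chars.lstrip t by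
        simp [PySem.Chars.lstrip, h]]
      rw [ih]
      simp [PySem.Chars.split₀.go, h]
    · rw [show PySem.Chars.lstrip (a :: t) = a :: t by
        simp [PySem.Chars.lstrip, h]]

theorem split₀_go_rstrip (s cur : List Char) (acc : List (List Char)) :
    PySem.Chars.split₀.go (PySem.Chars.rstrip s) cur acc = PySem.Chars.split₀.go s cur acc := by
  have hdecomp : s = PySem.Chars.rstrip s ++ (List.takeWhile PySem.Chars.isspace s.reverse).reverse := by
    unfold PySem.Chars.rstrip
    rw [← List.reverse_append, List.takeWhile_append_dropWhile, List.reverse_reverse]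
  conv_rhs => rw [hdecomp]
  rw [split₀_go_append_spaces (fun c hc => List.mem_takeWhile_imp (List.mem_reverse.mp hc))]

theorem split₀_strip (s : List Char) :
    PySem.Chars.split₀ (PySem.Chars.strip s) = PySem.Chars.split₀ s := by
  unfold PySem.Chars.split₀ PySem.Chars.strip
  rw [split₀_go_rstrip, split₀_lstrip]

-- ===== VERDICT (by name: the statement is the Claim_ definition above) =====
theorem extract_sentence_py_spec : Claim_equal_extract_sentence_py := by
  intro text position _ hpre
  obtain ⟨h0, hn⟩ := hpre
  show _ = _
  unfold extract_sentence_py extract_sentence_py_alt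
  simp only
  rw [start_eq text.toList position h0 hn, end_eq text.toList position h0 hn, split₀_strip]
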